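-- pv_equiv track=rewrite | github.com/get-proofpilot/proofpilot-agent-hub | backend/agents/strategypilot/engine.py | _classify_urls
-- ===== SOURCE A (Python) =====
-- def _classify_urls(urls: list[str]) -> dict:
--     """Quick classification of URL list into page families."""
--     families = {
--         "service": 0, "location": 0, "blog": 0, "about": 0,
--         "contact": 0, "gallery": 0, "reviews": 0, "other": 0,
--     }
--     for url in urls:
--         lower = url.lower()
--         if "/service" in lower or "/repair" in lower or "/install" in lower:
--             families["service"] += 1
--         elif "/location" in lower or "/areas" in lower or "/city" in lower:
--             families["location"] += 1
--         elif "/blog" in lower or "/post" in lower or "/article" in lower: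
--             families["blog"] += 1
--         elif "/about" in lower or "/team" in lower:
--             families["about"] += 1
--         elif "/contact" in lower:
--             families["contact"] += 1
--         elif "/gallery" in lower or "/project" in lower or "/portfolio" in lower:
--             families["gallery"] += 1
--         elif "/review" in lower or "/testimonial" in lower:
--             families["reviews"] += 1
--         else:
--             families["other"] += 1
--     return families
-- ===== SOURCE B (Python) =====
-- FAMILY_SUBS = [
--     ("service", ["/service", "/repair", "/install"]),
--     ("location", ["/location", "/areas", "/city"]),
--     ("blog", ["/blog", "/post", "/article"]),
--     ("about", ["/about", "/team"]),
--     ("contact", ["/contact"]),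
--     ("gallery", ["/gallery", "/project", "/portfolio"]),
--     ("reviews", ["/review", "/testimonial"]),
-- ]
--
--
-- def _classify_urls(urls: list[str]) -> dict:
--     """Quick classification of URL list into page families.
--
--     Staged counting: one pass over the whole URL list per family, counting
--     URLs that match this family's substrings but none of the substrings of
--     any earlier (higher-priority) family; "other" is what remains.
--     """
--     lowers = [u.lower() for u in urls]
--     families = {}
--     seen = []
--     remaining = len(lowers)
--     for name, subs in FAMILY_SUBS:
--         cnt = len([l for l in lowers
--                    if any(s in l for s in subs)
--                    and not any(s in l for s in seen)])
--         families[name] = cnt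
--         seen = seen + subs
--         remaining -= cnt
--     families["other"] = remaining
--     return families
-- ===== Notes on version B (the rewrite author's own statement) =====
-- stated objective: alternative
-- what changed: Replaces the per-URL if/elif chain mutating a counter dict with staged family-by-family counting: for each family in priority order one pass counts URLs matching its substrings but none of the previously seen (higher-priority) substrings, and 'other' is computed by subtraction from the total.
import Mathlib
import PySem

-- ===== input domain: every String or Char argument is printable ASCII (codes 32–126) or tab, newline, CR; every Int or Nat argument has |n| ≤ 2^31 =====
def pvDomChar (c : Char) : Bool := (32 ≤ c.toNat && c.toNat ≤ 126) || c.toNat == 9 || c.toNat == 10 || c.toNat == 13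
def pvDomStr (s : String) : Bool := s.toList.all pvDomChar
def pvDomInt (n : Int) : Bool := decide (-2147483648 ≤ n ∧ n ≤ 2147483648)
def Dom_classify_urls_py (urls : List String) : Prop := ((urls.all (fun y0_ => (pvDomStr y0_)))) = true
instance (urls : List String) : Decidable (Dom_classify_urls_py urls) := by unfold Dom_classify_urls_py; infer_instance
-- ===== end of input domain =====

-- B replaces A's per-URL if/elif chain over a mutated counter dict by staged counting:
-- one pass per family (in priority order) counting URLs that match it but no earlier
-- family's substrings, with "other" obtained by subtraction; objective: alternative.

-- ===== PORT A =====
-- the if/elif chain of A's loop body, on the precomputed `lower = url.lower()`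
def lowerStep (d : PySem.Dict String Int) (lower : String) : PySem.Dict String Int :=
  if PySem.Str.isIn "/service" lower || PySem.Str.isIn "/repair" lower || PySem.Str.isIn "/install" lower then
    d.modify "service" 0 (· + 1)
  else if PySem.Str.isIn "/location" lower || PySem.Str.isIn "/areas" lower || PySem.Str.isIn "/city" lower then
    d.modify "location" 0 (· + 1)
  else if PySem.Str.isIn "/blog" lower || PySem.Str.isIn "/post" lower || PySem.Str.isIn "/article" lower then
    d.modify "blog" 0 (· + 1)
  else if PySem.Str.isIn "/about" lower || PySem.Str.isIn "/team" lower then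
    d.modify "about" 0 (· + 1)
  else if PySem.Str.isIn "/contact" lower then
    d.modify "contact" 0 (· + 1)
  else if PySem.Str.isIn "/gallery" lower || PySem.Str.isIn "/project" lower || PySem.Str.isIn "/portfolio" lower then
    d.modify "gallery" 0 (· + 1)
  else if PySem.Str.isIn "/review" lower || PySem.Str.isIn "/testimonial" lower then
    d.modify "reviews" 0 (· + 1)
  else
    d.modify "other" 0 (· + 1)

def stepA (d : PySem.Dict String Int) (url : String) : PySem.Dict String Int :=
  lowerStep d (PySem.Str.lower url)

def classify_urls_py (urls : List String) : List (String × Int) :=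
  (urls.foldl stepA (PySem.Dict.ofList
    [("service", 0), ("location", 0), ("blog", 0), ("about", 0),
     ("contact", 0), ("gallery", 0), ("reviews", 0), ("other", 0)])).items

-- ===== PORT B =====
def famSubs : List (String × List String) :=
  [("service", ["/service", "/repair", "/install"]),
   ("location", ["/location", "/areas", "/city"]),
   ("blog", ["/blog", "/post", "/article"]),
   ("about", ["/about", "/team"]),
   ("contact", ["/contact"]),
   ("gallery", ["/gallery", "/project", "/portfolio"]),
   ("reviews", ["/review", "/testimonial"])]

def matchesAny (lower : String) (subs : List String) : Bool :=
  subs.any (fun s => PySem.Str.isIn s lower)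

-- one iteration of B's staged loop: state = (families so far, seen substrings, remaining)
def stepB (lowers : List String)
    (st : List (String × Int) × List String × Int)
    (rule : String × List String) : List (String × Int) × List String × Int :=
  let cnt : Int :=
    ((lowers.filter (fun l => matchesAny l rule.2 && !matchesAny l st.2.1)).length : Int)
  (st.1 ++ [(rule.1, cnt)], st.2.1 ++ rule.2, st.2.2 - cnt)

def classify_urls_py_alt (urls : List String) : List (String × Int) :=
  let lowers := urls.map PySem.Str.lower
  let st := famSubs.foldl (stepB lowers) ([], [], (lowers.length : Int))
  st.1 ++ [("other", st.2.2)]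

-- ===== PRECONDITION & SPEC =====
def Spec_classify_urls_py (urls : List String) (out : List (String × Int)) : Prop := out = classify_urls_py_alt urls
instance (urls : List String) (out : List (String × Int)) : Decidable (Spec_classify_urls_py urls out) := by unfold Spec_classify_urls_py; infer_instance

-- ===== CLAIM (what is proved, stated in full; the proofs are below) =====
def Claim_equal_classify_urls_py : Prop := ∀ (urls : List String), Dom_classify_urls_py urls → Spec_classify_urls_py urls (classify_urls_py urls)

-- ===== LEMMAS AND PROOFS =====

-- the label A's chain assigns to a url (proof helper)
def chainLabel (u : String) : String :=
  if PySem.Str.isIn "/service" (PySem.Str.lower u) || PySem.Str.isIn "/repair" (PySem.Str.lower u) || PySem.Str.isIn "/install" (PySem.Str.lower u) then "service"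
  else if PySem.Str.isIn "/location" (PySem.Str.lower u) || PySem.Str.isIn "/areas" (PySem.Str.lower u) || PySem.Str.isIn "/city" (PySem.Str.lower u) then "location"
  else if PySem.Str.isIn "/blog" (PySem.Str.lower u) || PySem.Str.isIn "/post" (PySem.Str.lower u) || PySem.Str.isIn "/article" (PySem.Str.lower u) then "blog"
  else if PySem.Str.isIn "/about" (PySem.Str.lower u) || PySem.Str.isIn "/team" (PySem.Str.lower u) then "about"
  else if PySem.Str.isIn "/contact" (PySem.Str.lower u) then "contact"
  else if PySem.Str.isIn "/gallery" (PySem.Str.lower u) || PySem.Str.isIn "/project" (PySem.Str.lower u) || PySem.Str.isIn "/portfolio" (PySem.Str.lower u) then "gallery"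
  else if PySem.Str.isIn "/review" (PySem.Str.lower u) || PySem.Str.isIn "/testimonial" (PySem.Str.lower u) then "reviews"
  else "other"

theorem chainLabel_cases (u : String) :
    chainLabel u =
  if PySem.Str.isIn "/service" (PySem.Str.lower u) || PySem.Str.isIn "/repair" (PySem.Str.lower u) || PySem.Str.isIn "/install" (PySem.Str.lower u) then "service"
    else if PySem.Str.isIn "/location" (PySem.Str.lower u) || PySem.Str.isIn "/areas" (PySem.Str.lower u) || PySem.Str.isIn "/city" (PySem.Str.lower u) then "location"
    else if PySem.Str.isIn "/blog" (PySem.Str.lower u) || PySem.Str.isIn "/post" (PySem.Str.lower u) || PySem.Str.isIn "/article" (PySem.Str.lower u) then "blog"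
    else if PySem.Str.isIn "/about" (PySem.Str.lower u) || PySem.Str.isIn "/team" (PySem.Str.lower u) then "about"
    else if PySem.Str.isIn "/contact" (PySem.Str.lower u) then "contact"
    else if PySem.Str.isIn "/gallery" (PySem.Str.lower u) || PySem.Str.isIn "/project" (PySem.Str.lower u) || PySem.Str.isIn "/portfolio" (PySem.Str.lower u) then "gallery"
    else if PySem.Str.isIn "/review" (PySem.Str.lower u) || PySem.Str.isIn "/testimonial" (PySem.Str.lower u) then "reviews"
    else "other" := rfl

-- the same chain over 17 abstract booleans (one per substring test)
def chainOf (b1 b2 b3 b4 b5 b6 b7 b8 b9 b10 b11 b12 b13 b14 b15 b16 b17 : Bool) : String :=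
  if b1 || (b2 || b3) then "service"
  else if b4 || (b5 || b6) then "location"
  else if b7 || (b8 || b9) then "blog"
  else if b10 || b11 then "about"
  else if b12 then "contact"
  else if b13 || (b14 || b15) then "gallery"
  else if b16 || b17 then "reviews"
  else "other"

theorem chainLabel_chainOf (u : String) :
    chainLabel u = chainOf (PySem.Str.isIn "/service" (PySem.Str.lower u)) (PySem.Str.isIn "/repair" (PySem.Str.lower u)) (PySem.Str.isIn "/install" (PySem.Str.lower u)) (PySem.Str.isIn "/location" (PySem.Str.lower u)) (PySem.Str.isIn "/areas" (PySem.Str.lower u)) (PySem.Str.isIn "/city" (PySem.Str.lower u)) (PySem.Str.isIn "/blog" (PySem.Str.lower u)) (PySem.Str.isIn "/post" (PySem.Str.lower u)) (PySem.Str.isIn "/article" (PySem.Str.lower u)) (PySem.Str.isIn "/about" (PySem.Str.lower u)) (PySem.Str.isIn "/team" (PySem.Str.lower u)) (PySem.Str.isIn "/contact" (PySem.Str.lower u)) (PySem.Str.isIn "/gallery" (PySem.Str.lower u)) (PySem.Str.isIn "/project" (PySem.Str.lower u)) (PySem.Str.isIn "/portfolio" (PySem.Str.lower u)) (PySem.Str.isIn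 "/review" (PySem.Str.lower u)) (PySem.Str.isIn "/testimonial" (PySem.Str.lower u)) := by
  simp only [chainLabel, chainOf, Bool.or_assoc]

theorem pt1 (b1 b2 b3 b4 b5 b6 b7 b8 b9 b10 b11 b12 b13 b14 b15 b16 b17 : Bool) :
    ((b1 || (b2 || b3)) && !false) = (chainOf b1 b2 b3 b4 b5 b6 b7 b8 b9 b10 b11 b12 b13 b14 b15 b16 b17 == "service") := by
  rw [Bool.eq_iff_iff]
  simp only [chainOf, apply_ite (· == "service"), Bool.and_eq_true, Bool.or_eq_true,
    Bool.not_eq_true']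
  split_ifs <;> simp_all <;> (try (intros; simp_all))
theorem pt2 (b1 b2 b3 b4 b5 b6 b7 b8 b9 b10 b11 b12 b13 b14 b15 b16 b17 : Bool) :
    ((b4 || (b5 || b6)) && !(b1 || (b2 || b3))) = (chainOf b1 b2 b3 b4 b5 b6 b7 b8 b9 b10 b11 b12 b13 b14 b15 b16 b17 == "location") := by
  rw [Bool.eq_iff_iff]
  simp only [chainOf, apply_ite (· == "location"), Bool.and_eq_true, Bool.or_eq_true,
    Bool.not_eq_true']
  split_ifs <;> simp_all <;> (try (intros; simp_all))
theorem pt3 (b1 b2 b3 b4 b5 b6 b7 b8 b9 b10 b11 b12 b13 b14 b15 b16 b17 : Bool) :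
    ((b7 || (b8 || b9)) && !(b1 || (b2 || (b3 || (b4 || (b5 || b6)))))) = (chainOf b1 b2 b3 b4 b5 b6 b7 b8 b9 b10 b11 b12 b13 b14 b15 b16 b17 == "blog") := by
  rw [Bool.eq_iff_iff]
  simp only [chainOf, apply_ite (· == "blog"), Bool.and_eq_true, Bool.or_eq_true,
    Bool.not_eq_true']
  split_ifs <;> simp_all <;> (try (intros; simp_all))
theorem pt4 (b1 b2 b3 b4 b5 b6 b7 b8 b9 b10 b11 b12 b13 b14 b15 b16 b17 : Bool) :
    ((b10 || b11) && !(b1 || (b2 || (b3 || (b4 || (b5 || (b6 || (b7 || (b8 || b9))))))))) = (chainOf b1 b2 b3 b4 b5 b6 b7 b8 b9 b10 b11 b12 b13 b14 b15 b16 b17 == "about") := by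
  rw [Bool.eq_iff_iff]
  simp only [chainOf, apply_ite (· == "about"), Bool.and_eq_true, Bool.or_eq_true,
    Bool.not_eq_true']
  split_ifs <;> simp_all <;> (try (intros; simp_all))
theorem pt5 (b1 b2 b3 b4 b5 b6 b7 b8 b9 b10 b11 b12 b13 b14 b15 b16 b17 : Bool) :
    ((b12) && !(b1 || (b2 || (b3 || (b4 || (b5 || (b6 || (b7 || (b8 || (b9 || (b10 || b11))))))))))) = (chainOf b1 b2 b3 b4 b5 b6 b7 b8 b9 b10 b11 b12 b13 b14 b15 b16 b17 == "contact") := by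
  rw [Bool.eq_iff_iff]
  simp only [chainOf, apply_ite (· == "contact"), Bool.and_eq_true, Bool.or_eq_true,
    Bool.not_eq_true']
  split_ifs <;> simp_all <;> (try (intros; simp_all))
theorem pt6 (b1 b2 b3 b4 b5 b6 b7 b8 b9 b10 b11 b12 b13 b14 b15 b16 b17 : Bool) :
    ((b13 || (b14 || b15)) && !(b1 || (b2 || (b3 || (b4 || (b5 || (b6 || (b7 || (b8 || (b9 || (b10 || (b11 || b12)))))))))))) = (chainOf b1 b2 b3 b4 b5 b6 b7 b8 b9 b10 b11 b12 b13 b14 b15 b16 b17 == "gallery") := by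
  rw [Bool.eq_iff_iff]
  simp only [chainOf, apply_ite (· == "gallery"), Bool.and_eq_true, Bool.or_eq_true,
    Bool.not_eq_true']
  split_ifs <;> simp_all <;> (try (intros; simp_all))
theorem pt7 (b1 b2 b3 b4 b5 b6 b7 b8 b9 b10 b11 b12 b13 b14 b15 b16 b17 : Bool) :
    ((b16 || b17) && !(b1 || (b2 || (b3 || (b4 || (b5 || (b6 || (b7 || (b8 || (b9 || (b10 || (b11 || (b12 || (b13 || (b14 || b15))))))))))))))) = (chainOf b1 b2 b3 b4 b5 b6 b7 b8 b9 b10 b11 b12 b13 b14 b15 b16 b17 == "reviews") := by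
  rw [Bool.eq_iff_iff]
  simp only [chainOf, apply_ite (· == "reviews"), Bool.and_eq_true, Bool.or_eq_true,
    Bool.not_eq_true']
  split_ifs <;> simp_all <;> (try (intros; simp_all))

-- A's counter dict with symbolic counts, in A's fixed key order
def mkD (c1 c2 c3 c4 c5 c6 c7 c8 : Int) : PySem.Dict String Int :=
  ⟨[("service", c1), ("location", c2), ("blog", c3), ("about", c4),
    ("contact", c5), ("gallery", c6), ("reviews", c7), ("other", c8)]⟩

theorem md1 (c1 c2 c3 c4 c5 c6 c7 c8 : Int) :
    (mkD c1 c2 c3 c4 c5 c6 c7 c8).modify "service" 0 (· + 1) = mkD (c1 + 1) c2 c3 c4 c5 c6 c7 c8 := by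
  simp [mkD, PySem.Dict.modify, PySem.Dict.getD, PySem.Dict.get?, PySem.Dict.insert]

theorem md2 (c1 c2 c3 c4 c5 c6 c7 c8 : Int) :
    (mkD c1 c2 c3 c4 c5 c6 c7 c8).modify "location" 0 (· + 1) = mkD c1 (c2 + 1) c3 c4 c5 c6 c7 c8 := by
  simp [mkD, PySem.Dict.modify, PySem.Dict.getD, PySem.Dict.get?, PySem.Dict.insert]

theorem md3 (c1 c2 c3 c4 c5 c6 c7 c8 : Int) :
    (mkD c1 c2 c3 c4 c5 c6 c7 c8).modify "blog" 0 (· + 1) = mkD c1 c2 (c3 + 1) c4 c5 c6 c7 c8 := by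
  simp [mkD, PySem.Dict.modify, PySem.Dict.getD, PySem.Dict.get?, PySem.Dict.insert]

theorem md4 (c1 c2 c3 c4 c5 c6 c7 c8 : Int) :
    (mkD c1 c2 c3 c4 c5 c6 c7 c8).modify "about" 0 (· + 1) = mkD c1 c2 c3 (c4 + 1) c5 c6 c7 c8 := by
  simp [mkD, PySem.Dict.modify, PySem.Dict.getD, PySem.Dict.get?, PySem.Dict.insert]

theorem md5 (c1 c2 c3 c4 c5 c6 c7 c8 : Int) :
    (mkD c1 c2 c3 c4 c5 c6 c7 c8).modify "contact" 0 (· + 1) = mkD c1 c2 c3 c4 (c5 + 1) c6 c7 c8 := by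
  simp [mkD, PySem.Dict.modify, PySem.Dict.getD, PySem.Dict.get?, PySem.Dict.insert]

theorem md6 (c1 c2 c3 c4 c5 c6 c7 c8 : Int) :
    (mkD c1 c2 c3 c4 c5 c6 c7 c8).modify "gallery" 0 (· + 1) = mkD c1 c2 c3 c4 c5 (c6 + 1) c7 c8 := by
  simp [mkD, PySem.Dict.modify, PySem.Dict.getD, PySem.Dict.get?, PySem.Dict.insert]

theorem md7 (c1 c2 c3 c4 c5 c6 c7 c8 : Int) :
    (mkD c1 c2 c3 c4 c5 c6 c7 c8).modify "reviews" 0 (· + 1) = mkD c1 c2 c3 c4 c5 c6 (c7 + 1) c8 := by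
  simp [mkD, PySem.Dict.modify, PySem.Dict.getD, PySem.Dict.get?, PySem.Dict.insert]

theorem md8 (c1 c2 c3 c4 c5 c6 c7 c8 : Int) :
    (mkD c1 c2 c3 c4 c5 c6 c7 c8).modify "other" 0 (· + 1) = mkD c1 c2 c3 c4 c5 c6 c7 (c8 + 1) := by
  simp [mkD, PySem.Dict.modify, PySem.Dict.getD, PySem.Dict.get?, PySem.Dict.insert]

theorem stepA_mk (u : String) (c1 c2 c3 c4 c5 c6 c7 c8 : Int) :
    stepA (mkD c1 c2 c3 c4 c5 c6 c7 c8) u =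
  if PySem.Str.isIn "/service" (PySem.Str.lower u) || PySem.Str.isIn "/repair" (PySem.Str.lower u) || PySem.Str.isIn "/install" (PySem.Str.lower u) then mkD (c1 + 1) c2 c3 c4 c5 c6 c7 c8
  else if PySem.Str.isIn "/location" (PySem.Str.lower u) || PySem.Str.isIn "/areas" (PySem.Str.lower u) || PySem.Str.isIn "/city" (PySem.Str.lower u) then mkD c1 (c2 + 1) c3 c4 c5 c6 c7 c8
  else if PySem.Str.isIn "/blog" (PySem.Str.lower u) || PySem.Str.isIn "/post" (PySem.Str.lower u) || PySem.Str.isIn "/article" (PySem.Str.lower u) then mkD c1 c2 (c3 + 1) c4 c5 c6 c7 c8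
  else if PySem.Str.isIn "/about" (PySem.Str.lower u) || PySem.Str.isIn "/team" (PySem.Str.lower u) then mkD c1 c2 c3 (c4 + 1) c5 c6 c7 c8
  else if PySem.Str.isIn "/contact" (PySem.Str.lower u) then mkD c1 c2 c3 c4 (c5 + 1) c6 c7 c8
  else if PySem.Str.isIn "/gallery" (PySem.Str.lower u) || PySem.Str.isIn "/project" (PySem.Str.lower u) || PySem.Str.isIn "/portfolio" (PySem.Str.lower u) then mkD c1 c2 c3 c4 c5 (c6 + 1) c7 c8
  else if PySem.Str.isIn "/review" (PySem.Str.lower u) || PySem.Str.isIn "/testimonial" (PySem.Str.lower u) then mkD c1 c2 c3 c4 c5 c6 (c7 + 1) c8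
  else mkD c1 c2 c3 c4 c5 c6 c7 (c8 + 1) := by
  unfold stepA lowerStep
  split_ifs <;> simp [md1, md2, md3, md4, md5, md6, md7, md8]

theorem fold_items (urls : List String) :
    ∀ c1 c2 c3 c4 c5 c6 c7 c8 : Int,
    (urls.foldl stepA (mkD c1 c2 c3 c4 c5 c6 c7 c8)).items =
      [("service", c1 + ((urls.map chainLabel).count "service" : Int)), ("location", c2 + ((urls.map chainLabel).count "location" : Int)), ("blog", c3 + ((urls.map chainLabel).count "blog" : Int)), ("about", c4 + ((urls.map chainLabel).count "about" : Int)), ("contact", c5 + ((urls.map chainLabel).count "contact" : Int)), ("gallery", c6 + ((urls.map chainLabel).count "gallery" : Int)), ("reviews", c7 + ((urls.map chainLabel).count "reviews" : Int)), ("other", c8 + ((urls.map chainLabel).count "other" : Int))] := by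
  induction urls with
  | nil => intro c1 c2 c3 c4 c5 c6 c7 c8; simp [mkD]
  | cons u us ih =>
      intro c1 c2 c3 c4 c5 c6 c7 c8
      rw [List.foldl_cons, stepA_mk]
      rw [List.map_cons, chainLabel_cases u]
      split_ifs with h1 h2 h3 h4 h5 h6 h7 <;>
        rw [ih] <;> clear ih <;>
        simp [List.count_cons] <;> omega

-- B's per-family filter count equals the number of urls A's chain labels with that family
theorem cnt_eq (urls : List String) (subs seen : List String) (name : String)
    (h : ∀ u : String, (matchesAny (PySem.Str.lower u) subs && !matchesAny (PySem.Str.lower u) seen)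
          = (chainLabel u == name)) :
    (((urls.map PySem.Str.lower).filter
        (fun l => matchesAny l subs && !matchesAny l seen)).length : Int)
      = ((urls.map chainLabel).count name : Int) := by
  congr 1
  rw [← List.countP_eq_length_filter, List.countP_map, List.count, List.countP_map]
  exact List.countP_congr (fun u _ => by simp only [Function.comp_apply]; rw [h u])

-- the eight chain labels over a url list count up to its length
theorem count_sum (urls : List String) :
    (urls.map chainLabel).count "service" + (urls.map chainLabel).count "location"
      + (urls.map chainLabel).count "blog" + (urls.map chainLabel).count "about"
      + (urls.map chainLabel).count "contact" + (urls.map chainLabel).count "gallery"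
      + (urls.map chainLabel).count "reviews" + (urls.map chainLabel).count "other"
      = urls.length := by
  induction urls with
  | nil => simp
  | cons u us ih =>
      rw [List.map_cons, chainLabel_cases u]
      split_ifs <;> simp [List.count_cons] <;> omega

-- ===== VERDICT (by name: the statement is the Claim_ definition above) =====
theorem classify_urls_py_spec : Claim_equal_classify_urls_py := by
  intro urls _
  unfold Spec_classify_urls_py classify_urls_py classify_urls_py_alt
  rw [show PySem.Dict.ofList
      [("service", (0:Int)), ("location", 0), ("blog", 0), ("about", 0),
       ("contact", 0), ("gallery", 0), ("reviews", 0), ("other", 0)] = mkD 0 0 0 0 0 0 0 0 by decide]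
  rw [fold_items]
  simp only [famSubs, List.foldl_cons, List.foldl_nil, stepB,
    List.nil_append, List.cons_append, List.append_nil]
  rw [      cnt_eq urls _ _ "service" (fun u => by
        simp only [matchesAny, List.any_cons, List.any_nil, Bool.or_false]
        rw [chainLabel_chainOf]
        exact pt1 _ _ _ _ _ _ _ _ _ _ _ _ _ _ _ _ _),
      cnt_eq urls _ _ "location" (fun u => by
        simp only [matchesAny, List.any_cons, List.any_nil, Bool.or_false]
        rw [chainLabel_chainOf]
        exact pt2 _ _ _ _ _ _ _ _ _ _ _ _ _ _ _ _ _),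
      cnt_eq urls _ _ "blog" (fun u => by
        simp only [matchesAny, List.any_cons, List.any_nil, Bool.or_false]
        rw [chainLabel_chainOf]
        exact pt3 _ _ _ _ _ _ _ _ _ _ _ _ _ _ _ _ _),
      cnt_eq urls _ _ "about" (fun u => by
        simp only [matchesAny, List.any_cons, List.any_nil, Bool.or_false]
        rw [chainLabel_chainOf]
        exact pt4 _ _ _ _ _ _ _ _ _ _ _ _ _ _ _ _ _),
      cnt_eq urls _ _ "contact" (fun u => by
        simp only [matchesAny, List.any_cons, List.any_nil, Bool.or_false]
        rw [chainLabel_chainOf]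
        exact pt5 _ _ _ _ _ _ _ _ _ _ _ _ _ _ _ _ _),
      cnt_eq urls _ _ "gallery" (fun u => by
        simp only [matchesAny, List.any_cons, List.any_nil, Bool.or_false]
        rw [chainLabel_chainOf]
        exact pt6 _ _ _ _ _ _ _ _ _ _ _ _ _ _ _ _ _),
      cnt_eq urls _ _ "reviews" (fun u => by
        simp only [matchesAny, List.any_cons, List.any_nil, Bool.or_false]
        rw [chainLabel_chainOf]
        exact pt7 _ _ _ _ _ _ _ _ _ _ _ _ _ _ _ _ _)]
  have hs := count_sum urls
  simp only [List.length_map]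
  simp <;> omega
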